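-- pv_equiv track=rewrite | github.com/anand0906/DataStructures-Algorithms | Prefix Sum/Problems/Longest Subarray With K Odd Numbers.py | optimized2
-- ===== SOURCE A (Python) =====
-- def optimized2(n,arr,target):
--     maxi=0
--     if(target<0):
--         return 0
--     left,right=0,0
--     currentSum=0
--     oddCnt=0
--     while (right<n):
--         if(arr[right]%2!=0):
--             oddCnt+=1
--         while oddCnt>target and left<=right:
--             if(arr[left]%2!=0):
--                 oddCnt-=1
--             left+=1
--         if(oddCnt==target):
--             length=right-left+1
--             maxi=max(maxi,length)
--         right+=1
--     return maxi
-- ===== SOURCE B (Python) =====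
-- def optimized2(n, arr, target):
--     # prefix-count approach: earliest index for each running odd-count, seeded {0: -1}
--     if target < 0:
--         return 0
--     first = {0: -1}
--     odd = 0
--     maxi = 0
--     for i in range(n):
--         if arr[i] % 2 != 0:
--             odd += 1
--         need = odd - target
--         if need in first:
--             maxi = max(maxi, i - first[need])
--         if odd not in first:
--             first[odd] = i
--     return maxi
-- ===== Notes on version B (the rewrite author's own statement) =====
-- stated objective: alternative
-- what changed: Replaced A's two-pointer sliding window (nested while loop shrinking the window) by a single forward pass that keeps a dict mapping each running odd-count to its earliest index and reads the window length off the prefix counts.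
import Mathlib
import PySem

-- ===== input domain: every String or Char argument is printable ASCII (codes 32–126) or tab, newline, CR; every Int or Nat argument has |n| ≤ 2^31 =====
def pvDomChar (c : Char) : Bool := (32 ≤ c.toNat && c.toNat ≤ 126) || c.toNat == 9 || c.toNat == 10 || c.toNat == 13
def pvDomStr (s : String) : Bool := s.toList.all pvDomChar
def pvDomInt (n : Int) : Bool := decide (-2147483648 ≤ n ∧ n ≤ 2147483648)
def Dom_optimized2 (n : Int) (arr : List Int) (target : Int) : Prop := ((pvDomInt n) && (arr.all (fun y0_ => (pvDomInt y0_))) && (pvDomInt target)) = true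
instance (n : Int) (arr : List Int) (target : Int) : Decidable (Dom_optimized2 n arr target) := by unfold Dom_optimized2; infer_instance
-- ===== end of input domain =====

-- B replaces A's two-pointer sliding window by a single pass with a dict of earliest
-- prefix odd-counts (alternative algorithm, same O(n) cost); return values proved equal.

-- ===== PORT A =====
-- shared helper: the test 'x % 2 != 0' (Python floor-mod)
def pvOdd (x : Int) : Bool := PySem.Int.mod x 2 != 0

-- inner 'while oddCnt>target and left<=right' loop of A
def aInner (arr : List Int) (target right left cnt : Int) : Int × Int :=
  if h : cnt > target ∧ left ≤ right then
    aInner arr target right (left + 1)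
      (if pvOdd (PySem.List.pyGetD arr left 0) then cnt - 1 else cnt)
  else (left, cnt)
termination_by (right + 1 - left).toNat
decreasing_by omega

-- outer 'while right<n' loop of A (arr[right] via pyGetD: Pre_ keeps the index in range)
def aOuter (n : Int) (arr : List Int) (target maxi left cnt right : Int) : Int :=
  if h : right < n then
    let cnt1 := if pvOdd (PySem.List.pyGetD arr right 0) then cnt + 1 else cnt
    let p := aInner arr target right left cnt1
    aOuter n arr target (if p.2 = target then max maxi (right - p.1 + 1) else maxi)
      p.1 p.2 (right + 1)
  else maxi
termination_by (n - right).toNat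
decreasing_by omega

def optimized2 (n : Int) (arr : List Int) (target : Int) : Int :=
  if target < 0 then 0 else aOuter n arr target 0 0 0 0

-- ===== PORT B =====
-- one iteration of B's 'for i in range(n)' loop; state = (maxi, odd, first)
def bStep (arr : List Int) (target : Int) (st : Int × Int × PySem.Dict Int Int) (i : Int) :
    Int × Int × PySem.Dict Int Int :=
  let odd := if pvOdd (PySem.List.pyGetD arr i 0) then st.2.1 + 1 else st.2.1
  let need := odd - target
  let maxi := match st.2.2.get? need with
    | some j => max st.1 (i - j)
    | none => st.1
  let first := if st.2.2.contains odd then st.2.2 else st.2.2.insert odd i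
  (maxi, odd, first)

def optimized2_alt (n : Int) (arr : List Int) (target : Int) : Int :=
  if target < 0 then 0
  else ((PySem.List.pyRange 0 n 1).foldl (bStep arr target)
          (0, 0, PySem.Dict.ofList [(0, -1)])).1

-- ===== PRECONDITION & SPEC =====
-- Pre_ excludes exactly the inputs where both Pythons raise IndexError: target ≥ 0 and n > len(arr).
def Pre_optimized2 (n : Int) (arr : List Int) (target : Int) : Prop :=
  target < 0 ∨ n ≤ (arr.length : Int)
instance (n : Int) (arr : List Int) (target : Int) : Decidable (Pre_optimized2 n arr target) := by
  unfold Pre_optimized2; infer_instance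

def pvWitness_optimized2 : Int × List Int × Int := (4, [1, 2, 3, 4], 1)

def Spec_optimized2 (n : Int) (arr : List Int) (target : Int) (out : Int) : Prop := out = optimized2_alt n arr target
instance (n : Int) (arr : List Int) (target : Int) (out : Int) : Decidable (Spec_optimized2 n arr target out) := by unfold Spec_optimized2; infer_instance

-- ===== CLAIM (what is proved, stated in full; the proofs are below) =====
def Claim_equal_optimized2 : Prop := ∀ (n : Int) (arr : List Int) (target : Int), Dom_optimized2 n arr target → Pre_optimized2 n arr target → Spec_optimized2 n arr target (optimized2 n arr target)

-- ===== LEMMAS AND PROOFS =====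

-- number of odd entries among the first k elements of arr
def Pc (arr : List Int) (k : ℕ) : ℕ := (arr.take k).countP (fun x => pvOdd x)

theorem Pc_zero (arr : List Int) : Pc arr 0 = 0 := rfl

theorem Pc_succ (arr : List Int) (k : ℕ) (hk : k < arr.length) :
    Pc arr (k + 1) = Pc arr k + (if pvOdd arr[k] then 1 else 0) := by
  unfold Pc
  rw [List.take_add_one, List.countP_append, List.getElem?_eq_getElem hk]
  simp [List.countP_cons]

theorem Pc_le_succ (arr : List Int) (k : ℕ) : Pc arr k ≤ Pc arr (k + 1) := by
  unfold Pc
  rw [List.take_add_one, List.countP_append]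
  omega

theorem Pc_step_le (arr : List Int) (k : ℕ) : Pc arr (k + 1) ≤ Pc arr k + 1 := by
  unfold Pc
  rw [List.take_add_one, List.countP_append]
  have : (arr[k]?.toList).countP (fun x => pvOdd x) ≤ (arr[k]?.toList).length :=
    List.countP_le_length
  have : (arr[k]?.toList).length ≤ 1 := by cases arr[k]? <;> simp
  omega

theorem Pc_mono (arr : List Int) {k k' : ℕ} (h : k ≤ k') : Pc arr k ≤ Pc arr k' := by
  induction k', h using Nat.le_induction with
  | base => exact le_rfl
  | succ m hm ih => exact le_trans ih (Pc_le_succ arr m)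

-- either nothing new at step k, or arr[k] is odd and the count goes up by one
theorem Pc_succ_cases (arr : List Int) (k : ℕ) :
    Pc arr (k + 1) = Pc arr k ∨
      (∃ h : k < arr.length, pvOdd arr[k] ∧ Pc arr (k + 1) = Pc arr k + 1) := by
  by_cases hk : k < arr.length
  · rw [Pc_succ arr k hk]
    by_cases ho : pvOdd arr[k]
    · exact Or.inr ⟨hk, ho, by simp [ho]⟩
    · exact Or.inl (by simp [ho])
  · left
    unfold Pc
    rw [List.take_add_one, List.getElem?_eq_none (by omega)]
    simp

-- a flat stretch of the prefix count contains no odd element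
theorem no_odd_between (arr : List Int) {l j i : ℕ} (h : Pc arr l = Pc arr j)
    (h1 : l ≤ i) (h2 : i < j) (h3 : i < arr.length) : ¬ pvOdd arr[i] := by
  intro contra
  have e1 : Pc arr (i + 1) = Pc arr i + 1 := by rw [Pc_succ arr i h3]; simp [contra]
  have e2 : Pc arr (i + 1) ≤ Pc arr j := Pc_mono arr (by omega)
  have e3 : Pc arr l ≤ Pc arr i := Pc_mono arr h1
  omega

-- position of the next odd element at or after l, if the count still grows
theorem exists_first_odd (arr : List Int) {l c : ℕ} (h : Pc arr l < Pc arr c) :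
    ∃ j, l ≤ j ∧ j < c ∧ ∃ hj : j < arr.length, pvOdd arr[j] ∧ Pc arr j = Pc arr l := by
  induction c with
  | zero => simp [Pc_zero] at h
  | succ c ih =>
    by_cases hc : Pc arr l < Pc arr c
    · obtain ⟨j, h1, h2, hj⟩ := ih hc
      exact ⟨j, h1, by omega, hj⟩
    · rcases Pc_succ_cases arr c with he | ⟨hcl, ho, he⟩
      · omega
      · have hlc : l ≤ c := by
          by_contra hl
          have : Pc arr (c + 1) ≤ Pc arr l := Pc_mono arr (by omega)
          omega
        exact ⟨c, hlc, by omega, hcl, ho, by omega⟩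

-- odd positions are determined by their prefix count
theorem odd_pos_unique (arr : List Int) {j j' : ℕ} (hj : j < arr.length) (hj' : j' < arr.length)
    (oj : pvOdd arr[j]) (oj' : pvOdd arr[j']) (h : Pc arr (j + 1) = Pc arr (j' + 1)) : j = j' := by
  rcases lt_trichotomy j j' with hlt | heq | hgt
  · have e1 : Pc arr (j + 1) ≤ Pc arr j' := Pc_mono arr (by omega)
    have e2 : Pc arr (j' + 1) = Pc arr j' + 1 := by rw [Pc_succ arr j' hj']; simp [oj']
    omega
  · exact heq
  · have e1 : Pc arr (j' + 1) ≤ Pc arr j := Pc_mono arr (by omega)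
    have e2 : Pc arr (j + 1) = Pc arr j + 1 := by rw [Pc_succ arr j hj]; simp [oj]
    omega

-- the joint invariant after processing the first k indices
def pvInv (arr : List Int) (target : Int) (k : ℕ)
    (sA : Int × Int × Int) (sB : Int × Int × PySem.Dict Int Int) : Prop :=
  sA.1 = sB.1 ∧ 0 ≤ sA.1 ∧
  (∃ l : ℕ, sA.2.1 = (l : Int) ∧ l ≤ k ∧
      sA.2.2 = (Pc arr k : Int) - (Pc arr l : Int) ∧ sA.2.2 ≤ target ∧
      (∀ l' : ℕ, l' < l → target < (Pc arr k : Int) - (Pc arr l' : Int))) ∧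
  sB.2.1 = (Pc arr k : Int) ∧
  (∃ g : ℕ → Int,
      (∀ x : Int, sB.2.2.get? x =
        if 0 ≤ x ∧ x ≤ (Pc arr k : Int) then some (g x.toNat) else none) ∧
      g 0 = -1 ∧
      (∀ c : ℕ, 1 ≤ c → c ≤ Pc arr k →
        ∃ j : ℕ, g c = (j : Int) ∧ j < k ∧ ∃ hj : j < arr.length,
          pvOdd arr[j] ∧ Pc arr (j + 1) = c))

theorem aInner_stop (arr : List Int) (target right left cnt : Int) (h : cnt ≤ target) :
    aInner arr target right left cnt = (left, cnt) := by
  rw [aInner]; simp; omega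

theorem pyGetD_at (arr : List Int) (i : ℕ) (hi : i < arr.length) :
    PySem.List.pyGetD arr (i : Int) 0 = arr[i] := by
  rw [PySem.List.pyGetD_natCast]
  simp [List.getD_eq_getElem?_getD, List.getElem?_eq_getElem hi]

theorem aInner_move (arr : List Int) (target : Int) (k : ℕ) :
    ∀ (d j l : ℕ), j - l = d → l ≤ j → j ≤ k → ∀ hj : j < arr.length, pvOdd arr[j] →
    (∀ i : ℕ, l ≤ i → i < j → ∀ hi : i < arr.length, ¬ pvOdd arr[i]) →
    aInner arr target (k : Int) (l : Int) (target + 1) = ((j : Int) + 1, target) := by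
  intro d
  induction d with
  | zero =>
    intro j l hd hlj hjk hj oj hno
    have hjl : j = l := by omega
    subst hjl
    rw [aInner, dif_pos ⟨by omega, by exact_mod_cast hjk⟩, pyGetD_at arr j hj]
    simp only [oj, if_pos]
    rw [aInner_stop arr target _ _ _ (by omega)]
    simp
  | succ d ih =>
    intro j l hd hlj hjk hj oj hno
    have hl : l < j := by omega
    have hll : l < arr.length := by omega
    rw [aInner, dif_pos ⟨by omega, by exact_mod_cast le_trans (le_of_lt hl) hjk⟩,
      pyGetD_at arr l hll]
    have hne : pvOdd arr[l] = false := by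
      have := hno l le_rfl hl hll
      simpa using this
    simp only [hne, Bool.false_eq_true, if_false]
    have : ((l : Int) + 1) = ((l + 1 : ℕ) : Int) := by push_cast; ring
    rw [this]
    exact ih j (l + 1) (by omega) (by omega) hjk hj oj
      (fun i h1 h2 hi => hno i (by omega) h2 hi)

-- the dict entry at the current window's left boundary
theorem g_at_left (arr : List Int) (k l : ℕ) (g : ℕ → Int)
    (h1 : l = 0 ∨ Pc arr (l - 1) < Pc arr l) (hg0 : g 0 = -1)
    (hgc : ∀ c : ℕ, 1 ≤ c → c ≤ Pc arr k →
        ∃ j : ℕ, g c = (j : Int) ∧ j < k ∧ ∃ hj : j < arr.length,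
          pvOdd arr[j] ∧ Pc arr (j + 1) = c)
    (hplpk : Pc arr l ≤ Pc arr k) :
    g (Pc arr l) = (l : Int) - 1 := by
  rcases h1 with h1 | h1
  · subst h1; rw [Pc_zero, hg0]; simp
  · have hl1 : 1 ≤ l := by
      rcases Nat.eq_zero_or_pos l with h | h
      · subst h; simp [Pc_zero] at h1
      · exact h
    rcases Pc_succ_cases arr (l - 1) with he | ⟨hlen, hoddl, he⟩
    · rw [Nat.sub_add_cancel hl1] at he; omega
    · rw [Nat.sub_add_cancel hl1] at he
      obtain ⟨j, hgj, hjk, hjlen, hjodd, hPj⟩ := hgc (Pc arr l) (by omega) hplpk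
      have hPl : Pc arr ((l - 1) + 1) = Pc arr l := by rw [Nat.sub_add_cancel hl1]
      have := odd_pos_unique arr hjlen hlen hjodd hoddl (hPj.trans hPl.symm)
      rw [hgj, this]
      push_cast [hl1]
      omega

-- when the window undershoots the target, the needed count is not in the dict
theorem need_not_in (arr : List Int) (target : Int) (k l : ℕ) (g : ℕ → Int)
    (hmin : ∀ l' : ℕ, l' < l → target < (Pc arr k : Int) - (Pc arr l' : Int))
    (hlt : (Pc arr (k + 1) : Int) - (Pc arr l : Int) < target)
    (hgc : ∀ c : ℕ, 1 ≤ c → c ≤ Pc arr k →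
        ∃ j : ℕ, g c = (j : Int) ∧ j < k ∧ ∃ hj : j < arr.length,
          pvOdd arr[j] ∧ Pc arr (j + 1) = c) :
    ¬ (0 ≤ (Pc arr (k + 1) : Int) - target ∧
        (Pc arr (k + 1) : Int) - target ≤ (Pc arr k : Int)) := by
  rintro ⟨hge, hle⟩
  have hpk : Pc arr k ≤ Pc arr (k + 1) := Pc_le_succ arr k
  by_cases hc0 : (Pc arr (k + 1) : Int) - target = 0
  · have hl1 : 1 ≤ l := by
      rcases Nat.eq_zero_or_pos l with h | h
      · exfalso; subst h; rw [Pc_zero] at hlt; omega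
      · exact h
    have := hmin 0 (by omega)
    rw [Pc_zero] at this
    omega
  · obtain ⟨j, hgj, hjk, hjlen, hjodd, hPj⟩ :=
      hgc ((Pc arr (k + 1) : Int) - target).toNat (by omega) (by omega)
    have hPjc : (Pc arr (j + 1) : Int) = (Pc arr (k + 1) : Int) - target := by
      rw [hPj]; omega
    rcases Nat.lt_or_ge (j + 1) l with hc | hc
    · have := hmin (j + 1) hc
      have := Pc_mono arr (show j + 1 ≤ k by omega)
      omega
    · have := Pc_mono arr hc
      omega

-- the main step lemma: one iteration of each loop preserves the invariant
-- the dict update of one B-iteration preserves the dict characterisation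
theorem dict_step (arr : List Int) (k : ℕ) (hk : k < arr.length)
    (first : PySem.Dict Int Int) (g : ℕ → Int)
    (hget : ∀ x : Int, first.get? x =
        if 0 ≤ x ∧ x ≤ (Pc arr k : Int) then some (g x.toNat) else none)
    (hg0 : g 0 = -1)
    (hgc : ∀ c : ℕ, 1 ≤ c → c ≤ Pc arr k →
        ∃ j : ℕ, g c = (j : Int) ∧ j < k ∧ ∃ hj : j < arr.length,
          pvOdd arr[j] ∧ Pc arr (j + 1) = c) :
    ∃ g' : ℕ → Int,
      (∀ x : Int, (if first.contains ((Pc arr (k + 1) : Int)) then first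
            else first.insert ((Pc arr (k + 1) : Int)) (k : Int)).get? x =
          if 0 ≤ x ∧ x ≤ (Pc arr (k + 1) : Int) then some (g' x.toNat) else none) ∧
      g' 0 = -1 ∧
      (∀ c : ℕ, 1 ≤ c → c ≤ Pc arr (k + 1) →
        ∃ j : ℕ, g' c = (j : Int) ∧ j < k + 1 ∧ ∃ hj : j < arr.length,
          pvOdd arr[j] ∧ Pc arr (j + 1) = c) := by
  rcases Pc_succ_cases arr k with he | ⟨_, ho, he⟩
  · -- arr[k] even: the running count is unchanged and already a key
    have hc : first.contains ((Pc arr (k + 1) : Int)) = true := by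
      rw [PySem.Dict.contains_eq_isSome_get?, hget, if_pos ⟨by omega, by omega⟩]
      rfl
    rw [he]
    refine ⟨g, ?_, hg0, ?_⟩
    · intro x
      rw [he] at hc
      rw [if_pos hc, hget]
    · intro c h1 h2
      obtain ⟨j, e, hjk, hj⟩ := hgc c h1 h2
      exact ⟨j, e, by omega, hj⟩
  · -- arr[k] odd: the new count (Pc k)+1 is fresh and gets appended with value k
    have hc : first.contains ((Pc arr (k + 1) : Int)) = false := by
      rw [PySem.Dict.contains_eq_isSome_get?, hget, if_neg (by omega)]
      rfl
    rw [if_neg (by simp [hc])]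
    refine ⟨fun c => if c = Pc arr k + 1 then (k : Int) else g c, ?_, ?_, ?_⟩
    · intro x
      rw [PySem.Dict.get?_insert, hget]
      by_cases hx : x = ((Pc arr (k + 1) : Int))
      · subst hx
        have ht : ((Pc arr (k + 1) : Int)).toNat = Pc arr k + 1 := by omega
        rw [if_pos rfl, if_pos ⟨by omega, le_rfl⟩]
        simp [ht]
      · rw [if_neg hx]
        by_cases hcnd : 0 ≤ x ∧ x ≤ (Pc arr k : Int)
        · have ht : x.toNat ≠ Pc arr k + 1 := by omega
          rw [if_pos hcnd, if_pos ⟨hcnd.1, by omega⟩]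
          simp [ht]
        · rw [if_neg hcnd, if_neg (by omega)]
    · have ht : (0 : ℕ) ≠ Pc arr k + 1 := by omega
      simp [hg0]
    · intro c h1 h2
      by_cases hce : c = Pc arr k + 1
      · subst hce
        exact ⟨k, by simp, by omega, hk, ho, by omega⟩
      · have h2' : c ≤ Pc arr k := by omega
        obtain ⟨j, e, hjk, hj⟩ := hgc c h1 h2'
        exact ⟨j, by simp only [if_neg hce]; exact e, by omega, hj⟩

-- one iteration of each loop preserves the invariant
theorem step_main (arr : List Int) (target : Int) (h0 : 0 ≤ target) (k : ℕ)
    (hk : k < arr.length) (maxi left cnt maxi' odd : Int) (first : PySem.Dict Int Int)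
    (hInv : pvInv arr target k (maxi, left, cnt) (maxi', odd, first)) :
    pvInv arr target (k + 1)
      (let cnt1 := if pvOdd (PySem.List.pyGetD arr (k : Int) 0) then cnt + 1 else cnt
       let p := aInner arr target (k : Int) left cnt1
       ((if p.2 = target then max maxi ((k : Int) - p.1 + 1) else maxi), p.1, p.2))
      (bStep arr target (maxi', odd, first) (k : Int)) := by
  obtain ⟨hM, hM0, ⟨l, hleq, hlk, hcnt, hcle, hmin⟩, hodd, g, hget, hg0, hgc⟩ := hInv
  simp only at hM hM0 hcnt hcle hodd
  subst hM hodd hleq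
  have hpk : Pc arr k ≤ Pc arr (k + 1) := Pc_le_succ arr k
  have hpkle : Pc arr (k + 1) ≤ Pc arr k + 1 := Pc_step_le arr k
  have hpl : Pc arr l ≤ Pc arr k := Pc_mono arr hlk
  have hpk1 : Pc arr (k + 1) = Pc arr k + (if pvOdd arr[k] then 1 else 0) := Pc_succ arr k hk
  have hodd' : (if pvOdd arr[k] then (Pc arr k : Int) + 1 else (Pc arr k : Int)) =
      (Pc arr (k + 1) : Int) := by
    by_cases ho : pvOdd arr[k] <;> simp [ho] at hpk1 ⊢ <;> omega
  have hcnt1 : (if pvOdd arr[k] then cnt + 1 else cnt) =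
      (Pc arr (k + 1) : Int) - (Pc arr l : Int) := by
    by_cases ho : pvOdd arr[k] <;> simp [ho] at hpk1 ⊢ <;> omega
  obtain ⟨g', hget', hg0', hgc'⟩ := dict_step arr k hk first g hget hg0 hgc
  simp only [bStep, pyGetD_at arr k hk, hodd', hcnt1]
  by_cases hmv : (Pc arr (k + 1) : Int) - (Pc arr l : Int) ≤ target
  · -- window still within target: the left pointer does not move
    rw [aInner_stop arr target _ _ _ hmv]
    have hMeq : (if (Pc arr (k + 1) : Int) - (Pc arr l : Int) = target
          then max maxi ((k : Int) - (l : Int) + 1) else maxi) =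
        (match first.get? ((Pc arr (k + 1) : Int) - target) with
          | some j => max maxi ((k : Int) - j)
          | none => maxi) := by
      by_cases heq : (Pc arr (k + 1) : Int) - (Pc arr l : Int) = target
      · have hneed : (Pc arr (k + 1) : Int) - target = (Pc arr l : Int) := by omega
        have htn : ((Pc arr l : Int)).toNat = Pc arr l := by omega
        have h1 : l = 0 ∨ Pc arr (l - 1) < Pc arr l := by
          rcases Nat.eq_zero_or_pos l with h | h
          · exact Or.inl h
          · right
            have := hmin (l - 1) (by omega)
            omega
        rw [if_pos heq, hget, hneed, if_pos (show (0 : Int) ≤ (Pc arr l : Int) ∧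
          (Pc arr l : Int) ≤ (Pc arr k : Int) by omega)]
        simp only [htn, g_at_left arr k l g h1 hg0 hgc hpl]
        congr 1
        ring
      · rw [hget, if_neg (need_not_in arr target k l g hmin (by omega) hgc), if_neg heq]
    rw [hMeq]
    refine ⟨rfl, ?_, ⟨l, rfl, by omega, rfl, hmv, ?_⟩, rfl, g', hget', hg0', hgc'⟩
    · dsimp only
      split
      · exact le_trans hM0 (le_max_left _ _)
      · exact hM0
    · intro l' hl'
      have := hmin l' hl'
      omega
  · -- window overshoots: arr[k] is odd and the left pointer jumps past the next odd
    have ho : pvOdd arr[k] = true := by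
      by_cases ho : pvOdd arr[k]
      · exact ho
      · exfalso; simp [ho] at hpk1; omega
    simp only [ho, if_pos] at hpk1
    have hct : (Pc arr k : Int) - (Pc arr l : Int) = target := by omega
    have hplpk1 : Pc arr l < Pc arr (k + 1) := by omega
    obtain ⟨j, hlj, hjk1, hjlen, hjodd, hPj⟩ := exists_first_odd arr hplpk1
    have hPj1 : Pc arr (j + 1) = Pc arr l + 1 := by
      rw [Pc_succ arr j hjlen, hPj]; simp [hjodd]
    have htg : (Pc arr (k + 1) : Int) - (Pc arr l : Int) = target + 1 := by omega
    rw [htg, aInner_move arr target k (j - l) j l rfl hlj (by omega) hjlen hjodd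
      (fun i h1 h2 hi => no_odd_between arr hPj.symm h1 h2 hi)]
    have hMeq : (if (target : Int) = target then max maxi ((k : Int) - ((j : Int) + 1) + 1)
          else maxi) =
        (match first.get? ((Pc arr (k + 1) : Int) - target) with
          | some x => max maxi ((k : Int) - x)
          | none => maxi) := by
      rw [if_pos rfl]
      rcases Nat.lt_or_ge j k with hjk | hjk
      · have hneed : (Pc arr (k + 1) : Int) - target = ((Pc arr (j + 1) : ℕ) : Int) := by omega
        have hjk2 : Pc arr (j + 1) ≤ Pc arr k := Pc_mono arr (by omega)
        rw [hget, hneed, if_pos (show (0 : Int) ≤ ((Pc arr (j + 1) : ℕ) : Int) ∧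
          ((Pc arr (j + 1) : ℕ) : Int) ≤ (Pc arr k : Int) by omega)]
        have htn : ((Pc arr (j + 1) : ℕ) : Int).toNat = Pc arr (j + 1) := by omega
        obtain ⟨j'', e, _, hlen'', odd'', P''⟩ := hgc (Pc arr (j + 1)) (by omega) hjk2
        have : j'' = j := odd_pos_unique arr hlen'' hjlen odd'' hjodd P''
        subst this
        simp only [htn, e]
        congr 1
        ring
      · have hjek : j = k := by omega
        subst hjek
        have : Pc arr (j + 1) = Pc arr j + 1 := by omega
        rw [hget, if_neg (by omega)]
        have hz : (j : Int) - ((j : Int) + 1) + 1 = 0 := by ring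
        rw [hz, max_eq_left hM0]
    rw [hMeq]
    refine ⟨rfl, ?_, ⟨j + 1, by push_cast; ring, by omega, by push_cast; omega, le_rfl, ?_⟩,
      rfl, g', hget', hg0', hgc'⟩
    · dsimp only
      split
      · exact le_trans hM0 (le_max_left _ _)
      · exact hM0
    · intro l'' hl''
      have := Pc_mono arr (show l'' ≤ j by omega)
      omega

theorem run_eq (arr : List Int) (target n : Int) (h0 : 0 ≤ target) (hn : n ≤ (arr.length : Int)) :
    ∀ (d k : ℕ), (k : Int) + d = n →
    ∀ (maxi left cnt maxi' odd : Int) (first : PySem.Dict Int Int),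
    pvInv arr target k (maxi, left, cnt) (maxi', odd, first) →
    aOuter n arr target maxi left cnt (k : Int) =
      ((PySem.List.pyRange (k : Int) n 1).foldl (bStep arr target) (maxi', odd, first)).1 := by
  intro d
  induction d with
  | zero =>
    intro k hkd maxi left cnt maxi' odd first hInv
    have hkn : ¬ ((k : Int) < n) := by omega
    rw [aOuter, dif_neg hkn, PySem.List.pyRange_one_eq_nil (by omega)]
    exact hInv.1
  | succ d ih =>
    intro k hkd maxi left cnt maxi' odd first hInv
    have hkn : (k : Int) < n := by omega
    have hklen : k < arr.length := by omega
    have hstep := step_main arr target h0 k hklen maxi left cnt maxi' odd first hInv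
    rw [aOuter, dif_pos hkn, PySem.List.pyRange_one_cons hkn, List.foldl_cons]
    have hc : ((k : Int) + 1) = ((k + 1 : ℕ) : Int) := by push_cast; ring
    rw [hc]
    dsimp only [bStep] at hstep ⊢
    exact ih (k + 1) (by omega) _ _ _ _ _ _ hstep

theorem pvInv_init (arr : List Int) (target : Int) (h0 : 0 ≤ target) :
    pvInv arr target 0 (0, 0, 0) (0, 0, PySem.Dict.ofList [(0, -1)]) := by
  refine ⟨rfl, le_rfl, ⟨0, by simp, le_rfl, by simp [Pc_zero], h0, by omega⟩,
    by simp [Pc_zero], fun _ => -1, ?_, rfl, fun c h1 h2 => by rw [Pc_zero] at h2; omega⟩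
  intro x
  rw [Pc_zero]
  have he : (PySem.Dict.ofList [(0, -1)] : PySem.Dict Int Int) =
      (PySem.Dict.empty : PySem.Dict Int Int).insert 0 (-1) := rfl
  rw [he, PySem.Dict.get?_insert]
  by_cases hx : x = 0
  · subst hx
    simp
  · rw [if_neg hx, if_neg (by omega), PySem.Dict.get?_empty]

theorem optimized2_spec : Claim_equal_optimized2 := by
  intro n arr target _ hpre
  unfold Spec_optimized2 optimized2 optimized2_alt
  by_cases ht : target < 0
  · simp [ht]
  · have h0 : 0 ≤ target := by omega
    have hn : n ≤ (arr.length : Int) := by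
      rcases hpre with h | h
      · omega
      · exact h
    rw [if_neg ht, if_neg ht]
    by_cases hn0 : n ≤ 0
    · rw [aOuter, dif_neg (by omega), PySem.List.pyRange_one_eq_nil (by omega)]
      rfl
    · have := run_eq arr target n h0 hn n.toNat 0 (by omega) 0 0 0 0 0
        (PySem.Dict.ofList [(0, -1)]) (pvInv_init arr target h0)
      simpa using this
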